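-- pv_equiv track=rewrite | github.com/comely0120/Python_PJT | 백준/back_9037.py | teacher
-- ===== SOURCE A (Python) =====
-- def teacher(N, candy):
--     # 오른쪽 친구에게 추가해줄 사탕 개수
--     tmp_lst = [0 for i in range(N)]
--     for idx in range(N):
--         if candy[idx] % 2 :
--             candy[idx] += 1
--         tmp_lst[(idx+1)%N] = candy[idx] // 2
--         candy[idx] //= 2
--
--     for idx in range(N):
--         candy[idx] += tmp_lst[idx]
--     return candy
-- ===== SOURCE B (Python) =====
-- def teacher(N, candy):
--     # One in-place pass: keep only the rolling "half of previous pile" scalar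
--     # instead of building a full auxiliary list and looping twice.
--     if N <= 0:
--         return candy
--     last = candy[N - 1]
--     prev = (last + last % 2) // 2
--     for i in range(N):
--         c = candy[i]
--         h = (c + c % 2) // 2
--         candy[i] = h + prev
--         prev = h
--     return candy
-- ===== Notes on version B (the rewrite author's own statement) =====
-- stated objective: simpler
-- what changed: Replaced A's two passes plus an O(N) auxiliary tmp list with a single in-place pass that carries only a rolling 'half of the previous pile' scalar (the wrap-around half of the last pile is precomputed once).
import Mathlib
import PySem

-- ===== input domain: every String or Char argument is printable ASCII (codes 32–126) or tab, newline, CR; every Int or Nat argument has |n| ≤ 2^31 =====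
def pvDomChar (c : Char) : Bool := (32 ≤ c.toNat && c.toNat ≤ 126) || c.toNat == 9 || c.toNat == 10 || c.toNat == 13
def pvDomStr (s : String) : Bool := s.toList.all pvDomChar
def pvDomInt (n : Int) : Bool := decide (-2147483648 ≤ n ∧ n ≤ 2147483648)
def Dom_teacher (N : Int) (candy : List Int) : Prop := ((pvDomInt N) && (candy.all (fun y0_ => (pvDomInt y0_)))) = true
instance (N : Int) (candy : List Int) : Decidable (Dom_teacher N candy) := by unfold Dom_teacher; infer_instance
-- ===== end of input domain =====

-- B changes the decomposition: one in-place pass carrying a rolling "half of the previous pile"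
-- scalar instead of A's two passes with an O(N) tmp list; the equivalence is about the RETURN
-- value (both Pythons also mutate candy in place, identically).

-- ===== PORT A =====
-- body of A's first loop: odd fix-up of candy[idx], write tmp_lst[(idx+1)%N], candy[idx] //= 2
def teacherBody1 (N : Int) (st : List Int × List Int) (idx : Int) : List Int × List Int :=
  let candy := st.1
  let tmp := st.2
  let candy :=
    if PySem.Int.mod (PySem.List.pyGetD candy idx 0) 2 ≠ 0 then
      PySem.List.pySetD candy idx (PySem.List.pyGetD candy idx 0 + 1)
    else candy
  let tmp := PySem.List.pySetD tmp (PySem.Int.mod (idx + 1) N)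
      (PySem.Int.floordiv (PySem.List.pyGetD candy idx 0) 2)
  let candy := PySem.List.pySetD candy idx (PySem.Int.floordiv (PySem.List.pyGetD candy idx 0) 2)
  (candy, tmp)

-- body of A's second loop: candy[idx] += tmp_lst[idx]
def teacherBody2 (tmp : List Int) (candy : List Int) (idx : Int) : List Int :=
  PySem.List.pySetD candy idx (PySem.List.pyGetD candy idx 0 + PySem.List.pyGetD tmp idx 0)

def teacher (N : Int) (candy : List Int) : List Int :=
  let tmp_lst : List Int := (PySem.List.pyRange 0 N 1).map (fun _ => 0)
  let st := (PySem.List.pyRange 0 N 1).foldl (teacherBody1 N) (candy, tmp_lst)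
  (PySem.List.pyRange 0 N 1).foldl (teacherBody2 st.2) st.1

-- ===== PORT B =====
-- body of B's single loop: h = ceil-half of candy[i]; candy[i] = h + prev; prev = h
def teacherAltBody (st : List Int × Int) (i : Int) : List Int × Int :=
  let c := PySem.List.pyGetD st.1 i 0
  let h := PySem.Int.floordiv (c + PySem.Int.mod c 2) 2
  (PySem.List.pySetD st.1 i (h + st.2), h)

def teacher_alt (N : Int) (candy : List Int) : List Int :=
  if N ≤ 0 then candy
  else
    let last := PySem.List.pyGetD candy (N - 1) 0
    let prev := PySem.Int.floordiv (last + PySem.Int.mod last 2) 2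
    ((PySem.List.pyRange 0 N 1).foldl teacherAltBody (candy, prev)).1

-- ===== PRECONDITION & SPEC =====
-- Pre_ excludes N > len(candy), on which A raises IndexError (candy[idx] out of range).
def Pre_teacher (N : Int) (candy : List Int) : Prop := N ≤ (candy.length : Int)
instance (N : Int) (candy : List Int) : Decidable (Pre_teacher N candy) := by unfold Pre_teacher; infer_instance
def pvWitness_teacher : Int × List Int := (3, [1, 2, 7])

def Spec_teacher (N : Int) (candy : List Int) (out : List Int) : Prop := out = teacher_alt N candy
instance (N : Int) (candy : List Int) (out : List Int) : Decidable (Spec_teacher N candy out) := by unfold Spec_teacher; infer_instance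

-- ===== CLAIM (what is proved, stated in full; the proofs are below) =====
def Claim_equal_teacher : Prop := ∀ (N : Int) (candy : List Int), Dom_teacher N candy → Pre_teacher N candy → Spec_teacher N candy (teacher N candy)

-- ===== LEMMAS AND PROOFS =====

-- ceil-half of a pile, the per-pile value both programs compute
def hf (c : Int) : Int := PySem.Int.floordiv (c + PySem.Int.mod c 2) 2

-- what tmp_lst holds at index j after A's first loop (= B's rolling prev entering step j)
def tval (n : Nat) (candy : List Int) (j : Nat) : Int :=
  if j = 0 then hf (candy.getD (n - 1) 0) else hf (candy.getD (j - 1) 0)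

theorem hf_even_half (c : Int) :
    (if PySem.Int.mod c 2 ≠ 0 then PySem.Int.floordiv (c + 1) 2 else PySem.Int.floordiv c 2) = hf c := by
  unfold hf
  have h2 : (0 : Int) < 2 := by norm_num
  simp only [PySem.Int.mod_eq_emod_of_pos h2, PySem.Int.floordiv_eq_ediv_of_pos h2]
  split_ifs with h <;> omega

theorem getD_set_int (l : List Int) (i j : Nat) (v : Int) :
    (l.set i v).getD j 0 = if i = j ∧ i < l.length then v else l.getD j 0 := by
  induction l generalizing i j with
  | nil => simp
  | cons a l ih =>
    cases i with
    | zero => cases j <;> simp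
    | succ i =>
      cases j with
      | zero => simp
      | succ j => simpa using ih i j

theorem getD_replicate_zero (n j : Nat) : (List.replicate n (0 : Int)).getD j 0 = 0 := by
  rcases Nat.lt_or_ge j n with h | h
  · simp [List.getD_eq_getElem?_getD, h]
  · have h' : (List.replicate n (0 : Int)).length ≤ j := by simpa using h
    simp [List.getD_eq_getElem?_getD, List.getElem?_eq_none h']

theorem ext_getD (l1 l2 : List Int) (hlen : l1.length = l2.length)
    (h : ∀ j, l1.getD j 0 = l2.getD j 0) : l1 = l2 := by
  apply List.ext_getElem hlen
  intro i h1 h2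
  have := h i
  simpa [List.getD_eq_getElem?_getD, List.getElem?_eq_getElem, h1, h2] using this

theorem castRange (N : Int) :
    PySem.List.pyRange 0 N 1 = (List.range N.toNat).map (fun j : Nat => (j : Int)) := by
  rw [PySem.List.pyRange_one]; simp

theorem tmp_init (N : Int) :
    (PySem.List.pyRange 0 N 1).map (fun _ => (0 : Int)) = List.replicate N.toNat (0 : Int) := by
  rw [castRange, List.map_map]
  simp [List.eq_replicate_iff]

-- invariant of A's first loop after k iterations
abbrev Inv1 (N : Int) (candy : List Int) (k : Nat) (st : List Int × List Int) : Prop :=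
  st.1.length = candy.length ∧ st.2.length = N.toNat ∧
  (∀ j : Nat, st.1.getD j 0 = if j < k then hf (candy.getD j 0) else candy.getD j 0) ∧
  (∀ j : Nat, j < N.toNat → st.2.getD j 0 =
    if 1 ≤ j ∧ j ≤ k then hf (candy.getD (j - 1) 0)
    else if j = 0 ∧ k = N.toNat then hf (candy.getD (N.toNat - 1) 0) else 0)

-- one step of A's first loop, after the odd fix-up stage has been characterised as C'
theorem step_common (N : Int) (candy : List Int) (hN : 0 < N) (hlen : N ≤ (candy.length : Int))
    (k : Nat) (hk : k + 1 ≤ N.toNat) (st : List Int × List Int)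
    (h2 : st.2.length = N.toNat)
    (h3 : ∀ j : Nat, st.1.getD j 0 = if j < k then hf (candy.getD j 0) else candy.getD j 0)
    (h4 : ∀ j : Nat, j < N.toNat → st.2.getD j 0 =
      if 1 ≤ j ∧ j ≤ k then hf (candy.getD (j - 1) 0)
      else if j = 0 ∧ k = N.toNat then hf (candy.getD (N.toNat - 1) 0) else 0)
    (C' : List Int) (hC'len : C'.length = candy.length)
    (hC'other : ∀ j : Nat, j ≠ k → C'.getD j 0 = st.1.getD j 0)
    (hval : PySem.Int.floordiv (C'.getD k 0) 2 = hf (candy.getD k 0)) :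
    Inv1 N candy (k + 1)
      (C'.set k (PySem.Int.floordiv (C'.getD k 0) 2),
       PySem.List.pySetD st.2 (PySem.Int.mod ((k : Int) + 1) N) (PySem.Int.floordiv (C'.getD k 0) 2)) := by
  have hkl : k < candy.length := by omega
  refine ⟨by simp [hC'len], by simp [PySem.List.length_pySetD, h2], ?_, ?_⟩
  · intro j
    rw [getD_set_int]
    by_cases hj : j = k
    · rw [if_pos (show k = j ∧ k < C'.length from ⟨hj.symm, by omega⟩), hval,
          if_pos (show j < k + 1 by omega), hj]
    · simp only [show ¬ (k = j ∧ k < C'.length) from fun h' => hj h'.1.symm, if_false]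
      rw [hC'other j hj, h3 j]
      split_ifs <;> first | rfl | omega
  · intro j hj
    by_cases hw : k + 1 < N.toNat
    · have hm : PySem.Int.mod ((k : Int) + 1) N = (((k + 1 : Nat)) : Int) := by
        rw [PySem.Int.mod_eq_emod_of_pos hN, Int.emod_eq_of_lt (by omega) (by omega)]
        push_cast; ring
      rw [hm, PySem.List.pySetD_natCast, getD_set_int]
      by_cases hj2 : j = k + 1
      · rw [if_pos (show k + 1 = j ∧ k + 1 < st.2.length from ⟨hj2.symm, by omega⟩), hval,
          if_pos (show 1 ≤ j ∧ j ≤ k + 1 by omega), hj2]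
        norm_num
      · simp only [show ¬ (k + 1 = j ∧ k + 1 < st.2.length) from fun h' => hj2 h'.1.symm, if_false]
        rw [h4 j hj]
        split_ifs <;> first | rfl | omega
    · have hkn : k + 1 = N.toNat := by omega
      have hm : PySem.Int.mod ((k : Int) + 1) N = (((0 : Nat)) : Int) := by
        rw [PySem.Int.mod_eq_emod_of_pos hN, show (k : Int) + 1 = N from by omega, Int.emod_self]
        simp
      rw [hm, PySem.List.pySetD_natCast, getD_set_int]
      by_cases hj0 : j = 0
      · rw [if_pos (show (0 : Nat) = j ∧ 0 < st.2.length from ⟨hj0.symm, by omega⟩), hval,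
          if_neg (show ¬ (1 ≤ j ∧ j ≤ k + 1) by omega),
          if_pos (show j = 0 ∧ k + 1 = N.toNat from ⟨hj0, hkn⟩)]
        have hk' : k = N.toNat - 1 := by omega
        rw [hk']
      · simp only [show ¬ ((0 : Nat) = j ∧ 0 < st.2.length) from fun h' => hj0 h'.1.symm, if_false]
        rw [h4 j hj]
        split_ifs <;> first | rfl | omega

theorem loop1 (N : Int) (candy : List Int) (hN : 0 < N) (hlen : N ≤ (candy.length : Int))
    (k : Nat) (hk : k ≤ N.toNat) :
    Inv1 N candy k (((List.range k).map (fun j : Nat => (j : Int))).foldl (teacherBody1 N)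
      (candy, List.replicate N.toNat (0 : Int))) := by
  induction k with
  | zero =>
    refine ⟨rfl, by simp, fun j => by simp, fun j hj => ?_⟩
    simp only [List.range_zero, List.map_nil, List.foldl_nil]
    rw [getD_replicate_zero]
    split_ifs <;> first | rfl | omega
  | succ k ih =>
    obtain ⟨h1, h2, h3, h4⟩ := ih (by omega)
    rw [List.range_succ, List.map_append, List.foldl_append]
    set st := ((List.range k).map (fun j : Nat => (j : Int))).foldl (teacherBody1 N)
      (candy, List.replicate N.toNat (0 : Int)) with hst
    have hkl : k < candy.length := by omega
    have hck : st.1.getD k 0 = candy.getD k 0 := by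
      have := h3 k; simpa using this
    simp only [List.map_cons, List.map_nil, List.foldl_cons, List.foldl_nil, teacherBody1]
    simp only [PySem.List.pyGetD_natCast, PySem.List.pySetD_natCast, hck]
    by_cases hodd : PySem.Int.mod (candy.getD k 0) 2 ≠ 0
    · simp only [if_pos hodd]
      have hget' : (st.1.set k (candy.getD k 0 + 1)).getD k 0 = candy.getD k 0 + 1 := by
        rw [getD_set_int]; simp [h1, hkl]
      exact step_common N candy hN hlen k hk st h2 h3 h4
        (st.1.set k (candy.getD k 0 + 1)) (by simp [h1]) 
        (fun j hj => by rw [getD_set_int]; simp [show ¬ (k = j ∧ k < st.1.length) from fun h' => hj h'.1.symm])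
        (by rw [hget', ← hf_even_half (candy.getD k 0), if_pos hodd])
    · simp only [if_neg hodd]
      exact step_common N candy hN hlen k hk st h2 h3 h4 st.1 h1
        (fun _ _ => rfl)
        (by rw [hck, ← hf_even_half (candy.getD k 0), if_neg hodd])

theorem loop2 (N : Int) (candy : List Int) (hN : 0 < N) (hlen : N ≤ (candy.length : Int))
    (C T : List Int) (hC : C.length = candy.length)
    (hCg : ∀ j : Nat, C.getD j 0 = if j < N.toNat then hf (candy.getD j 0) else candy.getD j 0)
    (hT : ∀ j : Nat, j < N.toNat → T.getD j 0 = tval N.toNat candy j)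
    (k : Nat) (hk : k ≤ N.toNat) :
    (((List.range k).map (fun j : Nat => (j : Int))).foldl (teacherBody2 T) C).length = candy.length ∧
    (∀ j : Nat, (((List.range k).map (fun j : Nat => (j : Int))).foldl (teacherBody2 T) C).getD j 0 =
      if j < k then hf (candy.getD j 0) + tval N.toNat candy j else C.getD j 0) := by
  induction k with
  | zero => exact ⟨hC, fun j => by simp⟩
  | succ k ih =>
    obtain ⟨e1, e2⟩ := ih (by omega)
    rw [List.range_succ, List.map_append, List.foldl_append]
    set C2 := ((List.range k).map (fun j : Nat => (j : Int))).foldl (teacherBody2 T) C with hC2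
    have hkl : k < candy.length := by omega
    have hread : C2.getD k 0 = hf (candy.getD k 0) := by
      rw [e2 k, if_neg (show ¬ k < k by omega), hCg k, if_pos (show k < N.toNat by omega)]
    simp only [List.map_cons, List.map_nil, List.foldl_cons, List.foldl_nil, teacherBody2,
      PySem.List.pyGetD_natCast, PySem.List.pySetD_natCast]
    refine ⟨by simp [e1], fun j => ?_⟩
    rw [getD_set_int, hread, hT k (by omega)]
    rcases Nat.lt_trichotomy j k with h | h | h
    · simp only [show ¬ (k = j ∧ k < C2.length) from fun h' => by omega, if_false, e2 j,
        show (j < k) = True from eq_true (by omega), show (j < k + 1) = True from eq_true (by omega),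
        if_true]
    · subst h
      rw [if_pos (show j = j ∧ j < C2.length from ⟨rfl, by omega⟩),
          if_pos (show j < j + 1 by omega)]
    · simp only [show ¬ (k = j ∧ k < C2.length) from fun h' => by omega, if_false, e2 j,
        show (j < k) = False from eq_false (by omega), show (j < k + 1) = False from eq_false (by omega),
        if_false]

-- invariant of B's single loop after k iterations
abbrev Inv3 (N : Int) (candy : List Int) (k : Nat) (st : List Int × Int) : Prop :=
  st.1.length = candy.length ∧
  st.2 = (if k = 0 then hf (candy.getD (N.toNat - 1) 0) else hf (candy.getD (k - 1) 0)) ∧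
  (∀ j : Nat, st.1.getD j 0 =
    if j < k then hf (candy.getD j 0) + tval N.toNat candy j else candy.getD j 0)

theorem loop3 (N : Int) (candy : List Int) (hN : 0 < N) (hlen : N ≤ (candy.length : Int))
    (k : Nat) (hk : k ≤ N.toNat) :
    Inv3 N candy k (((List.range k).map (fun j : Nat => (j : Int))).foldl teacherAltBody
      (candy, hf (candy.getD (N.toNat - 1) 0))) := by
  induction k with
  | zero => exact ⟨rfl, by simp, fun j => by simp⟩
  | succ k ih =>
    obtain ⟨e1, e2, e3⟩ := ih (by omega)
    rw [List.range_succ, List.map_append, List.foldl_append]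
    set st := ((List.range k).map (fun j : Nat => (j : Int))).foldl teacherAltBody
      (candy, hf (candy.getD (N.toNat - 1) 0)) with hst
    have hkl : k < candy.length := by omega
    have hread : st.1.getD k 0 = candy.getD k 0 := by
      have := e3 k; simpa using this
    simp only [List.map_cons, List.map_nil, List.foldl_cons, List.foldl_nil, teacherAltBody,
      PySem.List.pyGetD_natCast, PySem.List.pySetD_natCast, hread]
    have hprev : st.2 = tval N.toNat candy k := by
      rw [e2]; unfold tval; rfl
    refine ⟨by simp [e1], by simp [hf], fun j => ?_⟩
    rw [getD_set_int, hprev]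
    show (if k = j ∧ k < st.1.length then hf (candy.getD k 0) + tval N.toNat candy k
          else st.1.getD j 0) = _
    rcases Nat.lt_trichotomy j k with h | h | h
    · simp only [show ¬ (k = j ∧ k < st.1.length) from fun h' => by omega, if_false, e3 j,
        show (j < k) = True from eq_true (by omega), show (j < k + 1) = True from eq_true (by omega),
        if_true]
    · subst h
      rw [if_pos (show j = j ∧ j < st.1.length from ⟨rfl, by omega⟩),
          if_pos (show j < j + 1 by omega)]
    · simp only [show ¬ (k = j ∧ k < st.1.length) from fun h' => by omega, if_false, e3 j,
        show (j < k) = False from eq_false (by omega), show (j < k + 1) = False from eq_false (by omega),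
        if_false]

-- ===== VERDICT (by name: the statement is the Claim_ definition above) =====
theorem teacher_spec : Claim_equal_teacher := by
  intro N candy _ hpre
  unfold Spec_teacher
  by_cases hN : N ≤ 0
  · simp [teacher, teacher_alt, PySem.List.pyRange_one_eq_nil hN]
  · replace hN : 0 < N := by omega
    have hpre' : N ≤ (candy.length : Int) := hpre
    simp only [teacher, teacher_alt]
    rw [if_neg (show ¬ N ≤ 0 by omega)]
    rw [tmp_init, castRange]
    obtain ⟨h1, h2, h3, h4⟩ := loop1 N candy hN hpre' N.toNat le_rfl
    set st := ((List.range N.toNat).map (fun j : Nat => (j : Int))).foldl (teacherBody1 N)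
      (candy, List.replicate N.toNat (0 : Int)) with hst
    have hT : ∀ j : Nat, j < N.toNat → st.2.getD j 0 = tval N.toNat candy j := by
      intro j hj
      rw [h4 j hj]; unfold tval
      rcases Nat.eq_zero_or_pos j with h | h
      · simp [h]
      · simp [show 1 ≤ j ∧ j ≤ N.toNat from by omega, show j ≠ 0 from by omega]
    obtain ⟨f1, f2⟩ := loop2 N candy hN hpre' st.1 st.2 h1 h3 hT N.toNat le_rfl
    have hlast : PySem.List.pyGetD candy (N - 1) 0 = candy.getD (N.toNat - 1) 0 := by
      rw [show N - 1 = (((N.toNat - 1 : Nat)) : Int) from by omega, PySem.List.pyGetD_natCast]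
    rw [hlast]
    have hfold : PySem.Int.floordiv (candy.getD (N.toNat - 1) 0 +
        PySem.Int.mod (candy.getD (N.toNat - 1) 0) 2) 2 = hf (candy.getD (N.toNat - 1) 0) := rfl
    rw [hfold]
    obtain ⟨g1, g2, g3⟩ := loop3 N candy hN hpre' N.toNat le_rfl
    apply ext_getD _ _ (by rw [f1, g1])
    intro j
    rw [f2 j, g3 j, h3 j]
    by_cases hj : j < N.toNat
    · simp [hj]
    · simp [hj]
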